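-- pv_equiv track=rewrite | github.com/mpickpt/mana | contrib/mpi-proxy-split/mpi-wrappers/p2p-deterministic.py | macroize
-- ===== SOURCE A (Python) =====
-- def macroize_line(line):
--   if "//" in line:
--     line = line.replace("//", "/*", 1) + " */"
--   n = max(0, 60 - len(line))
--   return line + n*" " + " \\"
--
-- def macroize(lines):
--   in_macro = False
--   out = ["// *** THIS FILE IS AUTO-GENERATED! DO 'make' TO UPDATE. ***", ""]
--   lines = [line.rstrip() for line in lines]
--   for line in lines:
--     if not in_macro and line.startswith("#define ") and "(" in line:
--       in_macro = True
--       out.append(macroize_line(line))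
--     elif not in_macro:
--       out.append(line)
--     elif in_macro and line.strip(): # if non-empty line of macro
--       out.append(macroize_line(line))
--     elif in_macro and not line.strip(): # if empty line of macro: end macro
--       out[-1] = out[-1][:-2].rstrip()  # Strip final " \\"
--       out.append("")
--       in_macro = False;
--   return "\n".join(out)
-- ===== SOURCE B (Python) =====
-- def _finalize(line):
--   if "//" in line:
--     line = line.replace("//", "/*", 1) + " */"
--   return line
--
-- def _cont(line):
--   line = _finalize(line)
--   return line + max(0, 60 - len(line)) * " " + " \\"
--
-- def macroize(lines):
--   out = ["// *** THIS FILE IS AUTO-GENERATED! DO 'make' TO UPDATE. ***", ""]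
--   buf = []
--   for raw in lines:
--     line = raw.rstrip()
--     if buf:
--       if line.strip():
--         buf.append(line)
--       else:
--         out.extend(_cont(l) for l in buf[:-1])
--         out.append(_finalize(buf[-1]))
--         out.append("")
--         buf = []
--     elif line.startswith("#define ") and "(" in line:
--       buf = [line]
--     else:
--       out.append(line)
--   out.extend(_cont(l) for l in buf)
--   return "\n".join(out)
-- ===== Notes on version B (the rewrite author's own statement) =====
-- stated objective: alternative
-- what changed: Replaces A's in_macro flag with per-line emission and in-place back-patching of out[-1] (strip the trailing backslash after the fact) by a block-segmenting pass that buffers a whole macro block and flushes it at once, formatting the last buffered line directly without a backslash.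
import Mathlib
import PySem

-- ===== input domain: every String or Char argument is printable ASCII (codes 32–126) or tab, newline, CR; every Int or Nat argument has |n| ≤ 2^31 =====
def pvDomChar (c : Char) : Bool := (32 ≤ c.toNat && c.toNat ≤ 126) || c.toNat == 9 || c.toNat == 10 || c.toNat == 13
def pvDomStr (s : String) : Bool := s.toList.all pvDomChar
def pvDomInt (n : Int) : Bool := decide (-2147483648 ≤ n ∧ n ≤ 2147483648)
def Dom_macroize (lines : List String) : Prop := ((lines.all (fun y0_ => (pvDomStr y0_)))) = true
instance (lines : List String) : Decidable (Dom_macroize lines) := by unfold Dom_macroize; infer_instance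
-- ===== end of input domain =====

-- B replaces A's in_macro flag + in-place patching of out[-1] by a block-segmenting
-- pass with a macro-line buffer that is flushed whole (objective: alternative decomposition).

-- ===== PORT A =====
-- hand port of s.replace(old, new, 1) (count = 1): exact — splices the first
-- occurrence found by Chars.find, returns s unchanged if absent
def pvReplaceFirstA (cs old new : List Char) : List Char :=
  let i := PySem.Chars.find cs old
  if i < 0 then cs else cs.take i.toNat ++ new ++ cs.drop (i.toNat + old.length)

def macroize_lineA (line : List Char) : List Char :=
  let line := if PySem.Chars.isIn "//".toList line then
      pvReplaceFirstA line "//".toList "/*".toList ++ " */".toList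
    else line
  let n : Int := max 0 (60 - (line.length : Int))
  line ++ List.replicate n.toNat ' ' ++ " \\".toList

def macroizeStepA (st : Bool × List (List Char)) (line : List Char) :
    Bool × List (List Char) :=
  if !st.1 && PySem.Chars.startswith line "#define ".toList
      && PySem.Chars.isIn "(".toList line then
    (true, st.2 ++ [macroize_lineA line])
  else if !st.1 then
    (st.1, st.2 ++ [line])
  else if !(PySem.Chars.strip line).isEmpty then
    (st.1, st.2 ++ [macroize_lineA line])
  else
    (false, PySem.List.pySetD st.2 (-1)
        (PySem.Chars.rstrip
          (PySem.List.slice (PySem.List.pyGetD st.2 (-1) []) none (some (-2)))) ++ [[]])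

def macroize (lines : List String) : String :=
  let out0 : List (List Char) :=
    ["// *** THIS FILE IS AUTO-GENERATED! DO 'make' TO UPDATE. ***".toList, []]
  let ls := lines.map (fun l => PySem.Chars.rstrip l.toList)
  let res := ls.foldl macroizeStepA (false, out0)
  String.mk (PySem.Chars.join "\n".toList res.2)

-- ===== PORT B =====
-- hand port of s.replace(old, new, 1) (count = 1), B's own copy: exact as above
def pvReplaceFirstB (cs old new : List Char) : List Char :=
  let i := PySem.Chars.find cs old
  if i < 0 then cs else cs.take i.toNat ++ new ++ cs.drop (i.toNat + old.length)

def finalizeB (line : List Char) : List Char :=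
  if PySem.Chars.isIn "//".toList line then
    pvReplaceFirstB line "//".toList "/*".toList ++ " */".toList
  else line

def contB (line : List Char) : List Char :=
  let l := finalizeB line
  l ++ List.replicate (max 0 (60 - (l.length : Int))).toNat ' ' ++ " \\".toList

def stepB (st : List (List Char) × List (List Char)) (line : List Char) :
    List (List Char) × List (List Char) :=
  if !st.2.isEmpty then
    if !(PySem.Chars.strip line).isEmpty then (st.1, st.2 ++ [line])
    else (st.1 ++ (PySem.List.slice st.2 none (some (-1))).map contB
            ++ [finalizeB (PySem.List.pyGetD st.2 (-1) [])] ++ [[]], [])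
  else if PySem.Chars.startswith line "#define ".toList
      && PySem.Chars.isIn "(".toList line then
    (st.1, [line])
  else (st.1 ++ [line], st.2)

def macroize_alt (lines : List String) : String :=
  let out0 : List (List Char) :=
    ["// *** THIS FILE IS AUTO-GENERATED! DO 'make' TO UPDATE. ***".toList, []]
  let res := (lines.map (fun l => PySem.Chars.rstrip l.toList)).foldl stepB (out0, [])
  String.mk (PySem.Chars.join "\n".toList (res.1 ++ res.2.map contB))

-- ===== PRECONDITION & SPEC =====
def Spec_macroize (lines : List String) (out : String) : Prop := out = macroize_alt lines
instance (lines : List String) (out : String) : Decidable (Spec_macroize lines out) := by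
  unfold Spec_macroize; infer_instance

-- ===== CLAIM (what is proved, stated in full; the proofs are below) =====
def Claim_equal_macroize : Prop :=
  ∀ (lines : List String), Dom_macroize lines → Spec_macroize lines (macroize lines)

-- ===== LEMMAS AND PROOFS =====

-- a buffered line: already rstripped and nonempty
def GoodLine (l : List Char) : Prop := PySem.Chars.rstrip l = l ∧ l ≠ []

lemma dropWhile_space_replicate (k : ℕ) (t : List Char) :
    List.dropWhile PySem.Chars.isspace (List.replicate k ' ' ++ t)
      = List.dropWhile PySem.Chars.isspace t := by
  induction k with
  | zero => simp
  | succ k ih => simpa [List.replicate_succ] using ih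

lemma rstrip_append_spaces (x : List Char) (k : ℕ) :
    PySem.Chars.rstrip (x ++ List.replicate k ' ') = PySem.Chars.rstrip x := by
  simp [PySem.Chars.rstrip, List.reverse_append, dropWhile_space_replicate]

lemma rstrip_snoc_nonspace (ys : List Char) (c : Char)
    (h : PySem.Chars.isspace c = false) :
    PySem.Chars.rstrip (ys ++ [c]) = ys ++ [c] := by
  simp [PySem.Chars.rstrip, List.reverse_append, h]

lemma dropWhile_idem (p : Char → Bool) (l : List Char) :
    List.dropWhile p (List.dropWhile p l) = List.dropWhile p l := by
  induction l with
  | nil => simp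
  | cons a l ih =>
    by_cases h : p a = true
    · simpa [h] using ih
    · simp [List.dropWhile_cons, h]

lemma rstrip_idem (s : List Char) :
    PySem.Chars.rstrip (PySem.Chars.rstrip s) = PySem.Chars.rstrip s := by
  simp [PySem.Chars.rstrip, dropWhile_idem]

lemma strip_ne_nil {l : List Char} (h : ¬ (PySem.Chars.strip l).isEmpty = true) :
    l ≠ [] := by
  rintro rfl; simp [PySem.Chars.strip, PySem.Chars.lstrip, PySem.Chars.rstrip] at h

lemma rstrip_finalizeB {l : List Char} (h : GoodLine l) :
    PySem.Chars.rstrip (finalizeB l) = finalizeB l := by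
  unfold finalizeB
  split
  · have : pvReplaceFirstB l "//".toList "/*".toList ++ " */".toList
        = (pvReplaceFirstB l "//".toList "/*".toList ++ [' ', '*']) ++ ['/'] := by
      simp
    rw [this, rstrip_snoc_nonspace _ _ (by decide)]
  · exact h.1

lemma contB_eq (l : List Char) : contB l = macroize_lineA l := rfl

lemma contB_decomp (l : List Char) :
    contB l = finalizeB l
      ++ List.replicate (max 0 (60 - ((finalizeB l).length : Int))).toNat ' '
      ++ [' ', '\\'] := rfl

lemma key_lemma {l : List Char} (h : GoodLine l) :
    PySem.Chars.rstrip (PySem.List.slice (contB l) none (some (-2))) = finalizeB l := by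
  rw [contB_decomp]
  set m := finalizeB l with hm
  set k := (max 0 (60 - ((m).length : Int))).toNat with hk
  have hlen : (m ++ List.replicate k ' ' ++ [' ', '\\']).length
      = (m ++ List.replicate k ' ').length + 2 := by simp; omega
  rw [PySem.List.slice_to_neg_ofNat _ 2 (by omega), hlen]
  have : ((m ++ List.replicate k ' ') ++ [' ', '\\']).take
        ((m ++ List.replicate k ' ').length + 2 - 2)
      = m ++ List.replicate k ' ' := by
    simpa using List.take_left (l₁ := m ++ List.replicate k ' ') (l₂ := [' ', '\\'])
  rw [show m ++ List.replicate k ' ' ++ [' ', '\\']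
      = (m ++ List.replicate k ' ') ++ [' ', '\\'] by simp, this,
    rstrip_append_spaces]
  exact rstrip_finalizeB h

lemma pyGetD_append_singleton_neg_one {α : Type} (xs : List α) (x : α) (d : α) :
    PySem.List.pyGetD (xs ++ [x]) (-1) d = x := by
  simp [PySem.List.pyGetD, PySem.List.pyGet?_neg_one_append_singleton]

lemma pySetD_append_singleton_neg_one {α : Type} (xs : List α) (x v : α) :
    PySem.List.pySetD (xs ++ [x]) (-1) v = xs ++ [v] := by
  have h2 : -(((xs ++ [x]).length : Int)) ≤ -1 := by simp
  simp only [PySem.List.pySetD, PySem.List.pySet?, PySem.List.pyIdx?]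
  rw [if_neg (by omega), if_pos h2]
  simp [List.set_append]

lemma startswith_define_ne_nil {l : List Char}
    (h : PySem.Chars.startswith l "#define ".toList = true) : l ≠ [] := by
  rintro rfl
  simp [PySem.Chars.startswith] at h

-- main invariant: A's (flag, out) state is B's (out, buf) state with the buffer
-- rendered by contB and the flag = "buffer nonempty"
lemma fold_corr (ls : List (List Char)) :
    ∀ (out buf : List (List Char)),
      (∀ l ∈ ls, PySem.Chars.rstrip l = l) →
      (∀ b ∈ buf, GoodLine b) →
      ls.foldl macroizeStepA (!buf.isEmpty, out ++ buf.map contB)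
        = (!(ls.foldl stepB (out, buf)).2.isEmpty,
           (ls.foldl stepB (out, buf)).1 ++ ((ls.foldl stepB (out, buf)).2).map contB) := by
  induction ls with
  | nil => intro out buf _ _; rfl
  | cons l ls ih =>
    intro out buf hls hbuf
    have hl : PySem.Chars.rstrip l = l := hls l (by simp)
    have hls' : ∀ x ∈ ls, PySem.Chars.rstrip x = x := fun x hx => hls x (by simp [hx])
    simp only [List.foldl_cons]
    by_cases hbne : buf = []
    case neg =>
      obtain ⟨bs, bl, rfl⟩ : ∃ bs bl, buf = bs ++ [bl] := by
        rcases List.eq_nil_or_concat buf with h | ⟨bs, bl, h⟩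
        · exact absurd h hbne
        · exact ⟨bs, bl, by simpa using h⟩
      have hgl : GoodLine bl := hbuf bl (by simp)
      rw [show (!(bs ++ [bl]).isEmpty) = true from by simp]
      by_cases hst : (PySem.Chars.strip l).isEmpty = true
      · -- empty line: flush
        have hA : macroizeStepA (true, out ++ ((bs ++ [bl]).map contB)) l
            = (false, (out ++ bs.map contB) ++ [finalizeB bl] ++ [[]]) := by
          simp only [macroizeStepA]
          rw [if_neg (by simp), if_neg (by simp), if_neg (by simp [hst])]
          have hout : out ++ (bs ++ [bl]).map contB
              = (out ++ bs.map contB) ++ [contB bl] := by simp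
          rw [hout, pyGetD_append_singleton_neg_one, key_lemma hgl,
            pySetD_append_singleton_neg_one]
        have hB : stepB (out, bs ++ [bl]) l
            = ((out ++ bs.map contB) ++ [finalizeB bl] ++ [[]], []) := by
          simp only [stepB]
          rw [if_pos (by simp), if_neg (by simp [hst]),
            PySem.List.slice_to_neg_one, pyGetD_append_singleton_neg_one]
          simp
        rw [hA, hB]
        have := ih ((out ++ bs.map contB) ++ [finalizeB bl] ++ [[]]) [] hls' (by simp)
        simpa using this
      · -- non-empty line: keep buffering
        have hA : macroizeStepA (true, out ++ ((bs ++ [bl]).map contB)) l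
            = (true, (out ++ ((bs ++ [bl]).map contB)) ++ [macroize_lineA l]) := by
          simp only [macroizeStepA]
          rw [if_neg (by simp), if_neg (by simp), if_pos (by simp [hst])]
        have hB : stepB (out, bs ++ [bl]) l = (out, (bs ++ [bl]) ++ [l]) := by
          simp only [stepB]
          rw [if_pos (by simp), if_pos (by simp [hst])]
        rw [hA, hB]
        have hgood : ∀ b ∈ (bs ++ [bl]) ++ [l], GoodLine b := by
          intro b hb
          simp only [List.mem_append, List.mem_singleton] at hb
          rcases hb with (h | rfl) | rfl
          · exact hbuf b (by simp [h])
          · exact hbuf b (by simp)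
          · exact ⟨hl, strip_ne_nil hst⟩
        have := ih out ((bs ++ [bl]) ++ [l]) hls' hgood
        rw [show (!((bs ++ [bl]) ++ [l]).isEmpty) = true from by simp] at this
        simpa [contB_eq] using this
    case pos =>
      subst hbne
      simp only [List.map_nil, List.append_nil, List.isEmpty_nil, Bool.not_true]
      by_cases hc : (PySem.Chars.startswith l "#define ".toList
          && PySem.Chars.isIn "(".toList l) = true
      · have hA : macroizeStepA (false, out) l = (true, out ++ [macroize_lineA l]) := by
          simp only [macroizeStepA]
          rw [if_pos (by simp_all)]
        have hB : stepB (out, []) l = (out, [l]) := by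
          simp only [stepB]
          rw [if_neg (by simp), if_pos (by simp_all)]
        rw [hA, hB]
        have hgood : ∀ b ∈ [l], GoodLine b := by
          intro b hb
          rcases (by simpa using hb : b = l) with rfl
          exact ⟨hl, startswith_define_ne_nil (by
            simp only [Bool.and_eq_true] at hc; exact hc.1)⟩
        have := ih out [l] hls' hgood
        rw [show (!([l] : List (List Char)).isEmpty) = true from by simp] at this
        simpa [contB_eq] using this
      · have hA : macroizeStepA (false, out) l = (false, out ++ [l]) := by
          simp only [macroizeStepA]
          rw [if_neg (by simp_all), if_pos (by simp)]
        have hB : stepB (out, []) l = (out ++ [l], []) := by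
          simp only [stepB]
          rw [if_neg (by simp), if_neg (by simp_all)]
        rw [hA, hB]
        have := ih (out ++ [l]) [] hls' (by simp)
        simpa using this

-- ===== VERDICT (by name: the statement is the Claim_ definition above) =====
theorem macroize_spec : Claim_equal_macroize := by
  intro lines _
  unfold Spec_macroize macroize macroize_alt
  have hls : ∀ l ∈ lines.map (fun l => PySem.Chars.rstrip l.toList),
      PySem.Chars.rstrip l = l := by
    intro l hl
    rcases List.mem_map.mp hl with ⟨s, _, rfl⟩
    exact rstrip_idem _
  have hcorr := fold_corr (lines.map (fun l => PySem.Chars.rstrip l.toList))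
    ["// *** THIS FILE IS AUTO-GENERATED! DO 'make' TO UPDATE. ***".toList, []]
    [] hls (by simp)
  simp only [List.map_nil, List.append_nil, List.isEmpty_nil, Bool.not_true] at hcorr
  exact congrArg (fun r => String.mk (PySem.Chars.join "\n".toList r)) (by rw [hcorr])
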